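-- pv_equiv track=rewrite | github.com/beenorgone-notebook/python-notebook | py-practice/py-practice-hackerrank/101HacksJune2016/easy_gcd.py | common_prime_factors
-- ===== SOURCE A (Python) =====
-- def prime_factors(n):
--     primfac = []
--     d = 2
--     while d ** 2 <= n:
--         while n % d == 0:
--             if d not in primfac:
--                 primfac.append(d)
--             n //= d
--         d += 1
--     if n > 1:
--        primfac.append(n)
--     return primfac
--
-- def common_prime_factors(a_list):
--     if len(a_list) == 1:
--         return prime_factors(a_list[0])
--     min_num = min(a_list)
--     common_prime_factors = prime_factors(min_num)
--     for x in a_list: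
--         if x != min_num:
--             common_prime_factors = [i for i in common_prime_factors if x % i == 0]
--         if x == min_num:
--             continue
--     return common_prime_factors
-- ===== SOURCE B (Python) =====
-- def _gcd(a, b):
--     while b:
--         a, b = b, a % b
--     return a
--
-- def common_prime_factors(a_list):
--     g = min(a_list)
--     if g <= 1:
--         return []
--     for x in a_list:
--         g = _gcd(g, x)
--     res = []
--     d = 2
--     while d * d <= g:
--         if g % d == 0:
--             res.append(d)
--             while g % d == 0:
--                 g //= d
--         d += 1
--     if g > 1:
--         res.append(g)
--     return res
-- ===== Notes on version B (the rewrite author's own statement) =====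
-- stated objective: faster
-- what changed: B folds the whole list into a single gcd with Euclid's algorithm and factors only that gcd once, instead of factoring the minimum and rebuilding a filtered candidate list by divisibility tests against every element; the len==1 special case disappears and gcd<=1 short-circuits to [].
-- outside the precondition, e.g. on common_prime_factors([]): A raises ValueError, B raises ValueError
import Mathlib
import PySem

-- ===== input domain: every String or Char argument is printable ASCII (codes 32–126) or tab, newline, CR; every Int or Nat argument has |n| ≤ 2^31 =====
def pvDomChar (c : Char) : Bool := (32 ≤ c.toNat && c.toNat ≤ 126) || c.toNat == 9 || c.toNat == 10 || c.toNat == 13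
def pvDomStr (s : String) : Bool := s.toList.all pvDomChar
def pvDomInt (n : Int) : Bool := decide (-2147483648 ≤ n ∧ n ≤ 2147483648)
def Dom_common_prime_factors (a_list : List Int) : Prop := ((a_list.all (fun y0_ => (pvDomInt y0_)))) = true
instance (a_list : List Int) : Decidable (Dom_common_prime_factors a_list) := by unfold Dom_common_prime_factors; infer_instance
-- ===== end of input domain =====

-- B folds the list into one gcd by Euclid's algorithm and factors only that gcd once, instead of
-- A's "factor the minimum, then repeatedly rebuild the candidate list by divisibility tests";
-- a different algorithm; a timing run measured B faster on the generated inputs.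

-- ===== PORT A =====
-- inner 'while n % d == 0' of prime_factors; returns the updated (n, primfac).
-- The Nat fuel only makes the recursion total; prime_factors supplies enough fuel that
-- the 0 case is never reached on any run the Python performs (each division halves n).
def pfInner : Nat → Int → Int → List Int → Int × List Int
  | 0, _, n, acc => (n, acc)
  | fuel + 1, d, n, acc =>
      if PySem.Int.mod n d = 0 then
        pfInner fuel d (PySem.Int.floordiv n d) (if d ∈ acc then acc else acc ++ [d])
      else (n, acc)

-- outer 'while d ** 2 <= n' plus the final 'if n > 1' append; fuel as above
-- (d increases every iteration and stays ≤ n + 2, so n + 2 iterations always suffice).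
def pfOuter : Nat → Int → Int → List Int → List Int
  | 0, _, n, acc => if 1 < n then acc ++ [n] else acc
  | fuel + 1, d, n, acc =>
      if d * d ≤ n then
        pfOuter fuel (d + 1) (pfInner (n.toNat + 1) d n acc).1 (pfInner (n.toNat + 1) d n acc).2
      else if 1 < n then acc ++ [n] else acc

def prime_factors (n : Int) : List Int := pfOuter (n.toNat + 2) 2 n []

def common_prime_factors (a_list : List Int) : List Int :=
  if a_list.length = 1 then
    match PySem.List.pyGet? a_list 0 with
    | some a => prime_factors a
    | none => []   -- unreachable: the list has length 1
  else
    match PySem.List.min? a_list (fun x => x) with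
    | none => []   -- unreachable under Pre_: min([]) raises ValueError
    | some min_num =>
      -- 'for x in a_list: if x != min_num: … (the `if x == min_num: continue` is a no-op)'
      a_list.foldl
        (fun r x => if x ≠ min_num then r.filter (fun i => decide (PySem.Int.mod x i = 0)) else r)
        (prime_factors min_num)

-- ===== PORT B =====
-- Source B's _gcd: 'while b: a, b = b, a % b'; the fuel only makes it total (b strictly
-- decreases for b > 0, so b + 1 steps always suffice on the runs the Python performs).
def bgcd : Nat → Int → Int → Int
  | 0, a, _ => a
  | fuel + 1, a, b => if b ≠ 0 then bgcd fuel b (PySem.Int.mod a b) else a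

-- the inner 'while g % d == 0: g //= d' of Source B (strips every factor d; fuel as in pfInner)
def bStrip : Nat → Int → Int → Int
  | 0, _, g => g
  | fuel + 1, d, g =>
      if PySem.Int.mod g d = 0 then bStrip fuel d (PySem.Int.floordiv g d) else g

-- the trial-division loop of Source B: 'while d*d <= g: if g % d == 0: res.append(d); strip; d += 1'
def bLoop : Nat → Int → Int → List Int → List Int
  | 0, _, g, res => if 1 < g then res ++ [g] else res
  | fuel + 1, d, g, res =>
      if d * d ≤ g then
        if PySem.Int.mod g d = 0 then
          bLoop fuel (d + 1) (bStrip (g.toNat + 1) d g) (res ++ [d])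
        else bLoop fuel (d + 1) g res
      else if 1 < g then res ++ [g] else res

def bFactor (g : Int) : List Int := bLoop (g.toNat + 2) 2 g []

def common_prime_factors_alt (a_list : List Int) : List Int :=
  match PySem.List.min? a_list (fun x => x) with
  | none => []   -- unreachable under Pre_: min([]) raises ValueError
  | some m =>
    if m ≤ 1 then []
    else bFactor (a_list.foldl (fun g x => bgcd (x.toNat + 1) g x) m)

-- ===== PRECONDITION & SPEC =====
-- Pre_ excludes only the empty list, on which A (and B) raise ValueError via min([]).
def Pre_common_prime_factors (a_list : List Int) : Prop := a_list ≠ []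
instance (a_list : List Int) : Decidable (Pre_common_prime_factors a_list) := by
  unfold Pre_common_prime_factors; infer_instance
def pvWitness_common_prime_factors : List Int := [12, 30, 18]

def Spec_common_prime_factors (a_list : List Int) (out : List Int) : Prop := out = common_prime_factors_alt a_list
instance (a_list : List Int) (out : List Int) : Decidable (Spec_common_prime_factors a_list out) := by unfold Spec_common_prime_factors; infer_instance

-- ===== CLAIM (what is proved, stated in full; the proofs are below) =====
def Claim_equal_common_prime_factors : Prop := ∀ (a_list : List Int), Dom_common_prime_factors a_list → Pre_common_prime_factors a_list → Spec_common_prime_factors a_list (common_prime_factors a_list)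

-- ===== LEMMAS AND PROOFS =====

-- p is prime (stated over Int, for p ≥ 2: no divisor in [2, p))
def IsP (p : Int) : Prop := 2 ≤ p ∧ ∀ k : Int, 2 ≤ k → k < p → ¬ k ∣ p

theorem IsP_prime {p : Int} (h : IsP p) : Prime p := by
  obtain ⟨h2, hmin⟩ := h
  rw [Int.prime_iff_natAbs_prime, Nat.prime_def_lt]
  refine ⟨by omega, fun m hmlt hmdvd => ?_⟩
  by_contra hne
  have hm0 : m ≠ 0 := by rintro rfl; simp at hmdvd; omega
  have hm2 : 2 ≤ m := by omega
  have hdvd : (m : Int) ∣ p := by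
    have := Int.natCast_dvd_natCast.mpr hmdvd
    rwa [Int.natAbs_of_nonneg (by omega)] at this
  exact hmin m (by exact_mod_cast hm2) (by omega) hdvd

theorem IsP_of_min_dvd {d n : Int} (hd : 2 ≤ d) (hdvd : d ∣ n)
    (hmin : ∀ k : Int, 2 ≤ k → k < d → ¬ k ∣ n) : IsP d := by
  refine ⟨hd, fun k hk2 hkd hkdvd => hmin k hk2 hkd (hkdvd.trans hdvd)⟩

theorem pfInner_fst (fuel : Nat) (d n : Int) (acc : List Int) (hd : 2 ≤ d) (hn : 1 ≤ n) :
    1 ≤ (pfInner fuel d n acc).1 ∧ (pfInner fuel d n acc).1 ≤ n := by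
  induction fuel generalizing n acc with
  | zero => exact ⟨hn, le_refl n⟩
  | succ fuel ih =>
      rw [pfInner]
      by_cases hr : PySem.Int.mod n d = 0
      · simp only [if_pos hr]
        obtain ⟨c, hc⟩ := (PySem.Int.mod_eq_zero_iff_dvd n d).mp hr
        have hfd : PySem.Int.floordiv n d = c := by
          rw [PySem.Int.floordiv_eq_ediv_of_pos (by omega), hc]
          exact Int.mul_ediv_cancel_left _ (by omega)
        have hc1 : 1 ≤ c := by nlinarith
        have hle : c ≤ n := by nlinarith
        rw [hfd]
        have := ih c (if d ∈ acc then acc else acc ++ [d]) hc1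
        exact ⟨this.1, this.2.trans hle⟩
      · simp only [if_neg hr]
        exact ⟨hn, le_refl n⟩

theorem pfInner_spec (fuel : Nat) (d n : Int) (acc : List Int) (hd : 2 ≤ d) (hn : 1 ≤ n)
    (hmin : ∀ k : Int, 2 ≤ k → k < d → ¬ k ∣ n) (hfuel : n.toNat < 2 ^ fuel) :
    (pfInner fuel d n acc).1 ∣ n ∧
    ¬ d ∣ (pfInner fuel d n acc).1 ∧
    (∀ p : Int, IsP p → p ∣ n → p ∣ (pfInner fuel d n acc).1 ∨ p = d) ∧
    ((pfInner fuel d n acc).2 = acc ∨ (d ∉ acc ∧ (pfInner fuel d n acc).2 = acc ++ [d])) ∧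
    (∀ y : Int, y ∈ (pfInner fuel d n acc).2 ↔ y ∈ acc ∨ (y = d ∧ d ∣ n)) := by
  induction fuel generalizing n acc with
  | zero => rw [pow_zero] at hfuel; omega
  | succ fuel ih =>
      rw [pfInner]
      by_cases hr : PySem.Int.mod n d = 0
      · simp only [if_pos hr]
        have hdvd : d ∣ n := (PySem.Int.mod_eq_zero_iff_dvd n d).mp hr
        obtain ⟨c, hc⟩ := id hdvd
        have hfd : PySem.Int.floordiv n d = c := by
          rw [PySem.Int.floordiv_eq_ediv_of_pos (by omega), hc]
          exact Int.mul_ediv_cancel_left _ (by omega)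
        have hcn : c ∣ n := ⟨d, by rw [hc]; ring⟩
        have hc1 : 1 ≤ c := by nlinarith
        have h2c : 2 * c ≤ n := by nlinarith
        have hfuel' : c.toNat < 2 ^ fuel := by rw [pow_succ] at hfuel; omega
        have hmin' : ∀ k : Int, 2 ≤ k → k < d → ¬ k ∣ c :=
          fun k hk2 hkd hkc => hmin k hk2 hkd (hkc.trans hcn)
        rw [hfd]
        obtain ⟨i1, i3, i4, i5, i6⟩ :=
          ih c (if d ∈ acc then acc else acc ++ [d]) hc1 hmin' hfuel'
        have hd_mem : d ∈ (if d ∈ acc then acc else acc ++ [d]) := by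
          by_cases hmem : d ∈ acc <;> simp [hmem]
        refine ⟨i1.trans hcn, i3, ?_, ?_, ?_⟩
        · intro p hp hpn
          rw [hc] at hpn
          rcases ((IsP_prime hp).2.2 d c hpn) with hpd | hpc
          · right
            have hple : p ≤ d := Int.le_of_dvd (by omega) hpd
            by_contra hne
            exact hmin p hp.1 (by omega) (by rw [hc]; exact hpn)
          · rcases i4 p hp hpc with h | h
            · exact Or.inl h
            · exact Or.inr h
        · rcases i5 with h | ⟨hni, _⟩
          · rw [h]
            by_cases hmem : d ∈ acc
            · left; simp [hmem]
            · right; exact ⟨hmem, by simp [hmem]⟩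
          · exact absurd hd_mem hni
        · intro y
          rw [i6 y]
          by_cases hmem : d ∈ acc <;> by_cases hyd : y = d <;>
            · simp [hmem, hyd, hdvd]
              try tauto
      · simp only [if_neg hr]
        have hnd : ¬ d ∣ n := fun h => hr ((PySem.Int.mod_eq_zero_iff_dvd n d).mpr h)
        refine ⟨dvd_refl n, hnd, fun p _ hpn => Or.inl hpn, ?_, fun y => by tauto⟩
        left
        trivial

-- the loop-exit value 'acc ++ [n] if n > 1 else acc', characterized (shared by both ports' loops)
theorem pfExit (d n : Int) (acc : List Int) (hd : 2 ≤ d) (hn : 1 ≤ n) (hdn : ¬ d * d ≤ n)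
    (hmin : ∀ k : Int, 2 ≤ k → k < d → ¬ k ∣ n)
    (hacc : ∀ a ∈ acc, 2 ≤ a ∧ a < d) (hpw : acc.Pairwise (· < ·)) :
    (∀ y : Int, y ∈ (if 1 < n then acc ++ [n] else acc) ↔ y ∈ acc ∨ (IsP y ∧ y ∣ n)) ∧
    (if 1 < n then acc ++ [n] else acc).Pairwise (· < ·) := by
  by_cases h1 : 1 < n
  · simp only [if_pos h1]
    have hnd : d ≤ n := by
      by_contra hlt
      exact hmin n (by omega) (by omega) (dvd_refl n)
    have hnp : IsP n := by
      refine ⟨by omega, fun k hk2 hkn hkdvd => ?_⟩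
      obtain ⟨c, hc⟩ := hkdvd
      rcases lt_or_ge k d with hkd | hkd
      · exact hmin k hk2 hkd ⟨c, hc⟩
      · have hc1 : 1 ≤ c := by nlinarith
        have hc2 : 2 ≤ c := by
          rcases lt_or_ge c 2 with h | h
          · exfalso; have : c = 1 := by omega
            subst this; omega
          · exact h
        have hcd : c < d := by nlinarith
        exact hmin c hc2 hcd ⟨k, by rw [hc]; ring⟩
    constructor
    · intro y
      simp only [List.mem_append, List.mem_singleton]
      constructor
      · rintro (hy | rfl)
        · exact Or.inl hy
        · exact Or.inr ⟨hnp, dvd_refl y⟩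
      · rintro (hy | ⟨hyp, hydvd⟩)
        · exact Or.inl hy
        · right
          have hyn : y ≤ n := Int.le_of_dvd (by omega) hydvd
          by_contra hne
          exact hnp.2 y hyp.1 (by omega) hydvd
    · rw [List.pairwise_append]
      refine ⟨hpw, List.pairwise_singleton _ _, ?_⟩
      intro a ha b hb
      simp at hb; subst hb
      have := hacc a ha; omega
  · simp only [if_neg h1]
    have hn1 : n = 1 := by omega
    refine ⟨fun y => ?_, hpw⟩
    constructor
    · exact fun hy => Or.inl hy
    · rintro (hy | ⟨hyp, hydvd⟩)
      · exact hy
      · exfalso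
        rw [hn1] at hydvd
        have := Int.le_of_dvd one_pos hydvd
        have h2 := hyp.1
        omega

theorem pfOuter_spec (fuel : Nat) (d n : Int) (acc : List Int) (hd : 2 ≤ d) (hn : 1 ≤ n)
    (hmin : ∀ k : Int, 2 ≤ k → k < d → ¬ k ∣ n)
    (hacc : ∀ a ∈ acc, 2 ≤ a ∧ a < d) (hpw : acc.Pairwise (· < ·))
    (hfuel : (n + 2 - d).toNat ≤ fuel) :
    (∀ y : Int, y ∈ pfOuter fuel d n acc ↔ y ∈ acc ∨ (IsP y ∧ y ∣ n)) ∧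
    (pfOuter fuel d n acc).Pairwise (· < ·) := by
  induction fuel generalizing d n acc with
  | zero =>
      rw [pfOuter]
      have hdn : ¬ d * d ≤ n := by
        intro h
        have : n + 2 ≤ d := by omega
        nlinarith
      exact pfExit d n acc hd hn hdn hmin hacc hpw
  | succ fuel ih =>
      rw [pfOuter]
      by_cases hdn : d * d ≤ n
      · simp only [if_pos hdn]
        have hfst := pfInner_fst (n.toNat + 1) d n acc hd hn
        have hfin : n.toNat < 2 ^ (n.toNat + 1) :=
          lt_of_lt_of_le Nat.lt_two_pow_self (Nat.pow_le_pow_right (by omega) (by omega))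
        obtain ⟨i1, i3, i4, i5, i6⟩ := pfInner_spec (n.toNat + 1) d n acc hd hn hmin hfin
        have hmin' : ∀ k : Int, 2 ≤ k → k < d + 1 → ¬ k ∣ (pfInner (n.toNat + 1) d n acc).1 := by
          intro k hk2 hkd hkdvd
          rcases lt_or_eq_of_le (by omega : k ≤ d) with hlt | rfl
          · exact hmin k hk2 hlt (hkdvd.trans i1)
          · exact i3 hkdvd
        have hacc' : ∀ a ∈ (pfInner (n.toNat + 1) d n acc).2, 2 ≤ a ∧ a < d + 1 := by
          intro a ha
          rcases i5 with h | ⟨_, h⟩ <;> rw [h] at ha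
          · have := hacc a ha; omega
          · rcases List.mem_append.mp ha with h' | h'
            · have := hacc a h'; omega
            · simp at h'; omega
        have hpw' : (pfInner (n.toNat + 1) d n acc).2.Pairwise (· < ·) := by
          rcases i5 with h | ⟨_, h⟩ <;> rw [h]
          · exact hpw
          · rw [List.pairwise_append]
            exact ⟨hpw, List.pairwise_singleton _ _, by
              intro a ha b hb; simp at hb; subst hb; exact (hacc a ha).2⟩
        have hlen : d ≤ n := by nlinarith
        obtain ⟨IHmem, IHpw⟩ := ih (d + 1) _ _ (by omega) hfst.1 hmin' hacc' hpw'
          (by have := hfst.2; omega)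
        refine ⟨fun y => ?_, IHpw⟩
        rw [IHmem y, i6 y]
        constructor
        · rintro (((hy | ⟨rfl, hdn'⟩) | ⟨hyp, hydvd⟩))
          · exact Or.inl hy
          · exact Or.inr ⟨IsP_of_min_dvd hd hdn' hmin, hdn'⟩
          · exact Or.inr ⟨hyp, hydvd.trans i1⟩
        · rintro (hy | ⟨hyp, hydvd⟩)
          · exact Or.inl (Or.inl hy)
          · rcases i4 y hyp hydvd with h | rfl
            · exact Or.inr ⟨hyp, h⟩
            · exact Or.inl (Or.inr ⟨rfl, hydvd⟩)
      · simp only [if_neg hdn]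
        exact pfExit d n acc hd hn hdn hmin hacc hpw

theorem pf_mem {n : Int} (hn : 1 ≤ n) (y : Int) :
    y ∈ prime_factors n ↔ IsP y ∧ y ∣ n := by
  have h := pfOuter_spec (n.toNat + 2) 2 n [] (by omega) hn
    (fun k hk2 hkd _ => by omega) (fun a ha => by simp at ha) List.Pairwise.nil (by omega)
  rw [prime_factors, h.1 y]
  simp

theorem pf_nil {n : Int} (hn : n ≤ 0) : prime_factors n = [] := by
  have h0 : n.toNat = 0 := by omega
  rw [prime_factors, h0]
  rw [pfOuter, if_neg (by nlinarith : ¬(2:Int) * 2 ≤ n), if_neg (by omega : ¬(1:Int) < n)]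

theorem pf_le_one {n : Int} (hn : n ≤ 1) : prime_factors n = [] := by
  rcases lt_or_eq_of_le hn with h | rfl
  · exact pf_nil (by omega)
  · decide

theorem pf_pairwise (n : Int) : (prime_factors n).Pairwise (· < ·) := by
  rcases le_or_gt n 0 with hn | hn
  · rw [pf_nil hn]; exact List.Pairwise.nil
  · exact (pfOuter_spec (n.toNat + 2) 2 n [] (by omega) (by omega)
      (fun k hk2 hkd _ => by omega) (fun a ha => by simp at ha) List.Pairwise.nil (by omega)).2

theorem Afold_mem (m : Int) (l : List Int) (r : List Int) (y : Int) :
    y ∈ l.foldl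
      (fun r x => if x ≠ m then r.filter (fun i => decide (PySem.Int.mod x i = 0)) else r) r
    ↔ y ∈ r ∧ ∀ x ∈ l, x ≠ m → PySem.Int.mod x y = 0 := by
  induction l generalizing r with
  | nil => simp
  | cons x xs ih =>
      simp only [List.foldl_cons, ih, List.mem_cons]
      by_cases hx : x = m
      · subst hx
        simp only [ne_eq, not_true_eq_false, if_false]
        constructor
        · rintro ⟨hy, h⟩
          refine ⟨hy, fun z hz hzm => ?_⟩
          rcases hz with rfl | hz'
          · exact absurd rfl hzm
          · exact h z hz' hzm
        · rintro ⟨hy, h⟩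
          exact ⟨hy, fun z hz hzm => h z (Or.inr hz) hzm⟩
      · simp only [ne_eq, hx, not_false_eq_true, if_true, List.mem_filter, decide_eq_true_eq]
        constructor
        · rintro ⟨⟨hy, hmod⟩, h⟩
          refine ⟨hy, ?_⟩
          rintro z (rfl | hz) hzm
          · exact hmod
          · exact h z hz hzm
        · rintro ⟨hy, h⟩
          exact ⟨⟨hy, h x (Or.inl rfl) hx⟩, fun z hz hzm => h z (Or.inr hz) hzm⟩

theorem Afold_sublist (m : Int) (l : List Int) (r : List Int) :
    (l.foldl
      (fun r x => if x ≠ m then r.filter (fun i => decide (PySem.Int.mod x i = 0)) else r) r).Sublist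
      r := by
  induction l generalizing r with
  | nil => exact List.Sublist.refl r
  | cons x xs ih =>
      rw [List.foldl_cons]
      refine (ih _).trans ?_
      by_cases hx : x = m
      · simp [hx]
      · simp only [ne_eq, hx, not_false_eq_true, if_true]
        exact List.filter_sublist

-- ----- B-side lemmas -----

theorem bStrip_fst (fuel : Nat) (d g : Int) (hd : 2 ≤ d) (hg : 1 ≤ g) :
    1 ≤ bStrip fuel d g ∧ bStrip fuel d g ≤ g := by
  induction fuel generalizing g with
  | zero => exact ⟨hg, le_refl g⟩
  | succ fuel ih =>
      rw [bStrip]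
      by_cases hr : PySem.Int.mod g d = 0
      · simp only [if_pos hr]
        obtain ⟨c, hc⟩ := (PySem.Int.mod_eq_zero_iff_dvd g d).mp hr
        have hfd : PySem.Int.floordiv g d = c := by
          rw [PySem.Int.floordiv_eq_ediv_of_pos (by omega), hc]
          exact Int.mul_ediv_cancel_left _ (by omega)
        have hc1 : 1 ≤ c := by nlinarith
        have hle : c ≤ g := by nlinarith
        rw [hfd]
        have := ih c hc1
        exact ⟨this.1, this.2.trans hle⟩
      · simp only [if_neg hr]
        exact ⟨hg, le_refl g⟩

theorem bStrip_spec (fuel : Nat) (d g : Int) (hd : 2 ≤ d) (hg : 1 ≤ g)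
    (hmin : ∀ k : Int, 2 ≤ k → k < d → ¬ k ∣ g) (hfuel : g.toNat < 2 ^ fuel) :
    bStrip fuel d g ∣ g ∧
    ¬ d ∣ bStrip fuel d g ∧
    (∀ p : Int, IsP p → p ∣ g → p ∣ bStrip fuel d g ∨ p = d) := by
  induction fuel generalizing g with
  | zero => rw [pow_zero] at hfuel; omega
  | succ fuel ih =>
      rw [bStrip]
      by_cases hr : PySem.Int.mod g d = 0
      · simp only [if_pos hr]
        have hdvd : d ∣ g := (PySem.Int.mod_eq_zero_iff_dvd g d).mp hr
        obtain ⟨c, hc⟩ := id hdvd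
        have hfd : PySem.Int.floordiv g d = c := by
          rw [PySem.Int.floordiv_eq_ediv_of_pos (by omega), hc]
          exact Int.mul_ediv_cancel_left _ (by omega)
        have hcg : c ∣ g := ⟨d, by rw [hc]; ring⟩
        have hc1 : 1 ≤ c := by nlinarith
        have h2c : 2 * c ≤ g := by nlinarith
        have hfuel' : c.toNat < 2 ^ fuel := by rw [pow_succ] at hfuel; omega
        have hmin' : ∀ k : Int, 2 ≤ k → k < d → ¬ k ∣ c :=
          fun k hk2 hkd hkc => hmin k hk2 hkd (hkc.trans hcg)
        rw [hfd]
        obtain ⟨i1, i2, i3⟩ := ih c hc1 hmin' hfuel'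
        refine ⟨i1.trans hcg, i2, fun p hp hpg => ?_⟩
        rw [hc] at hpg
        rcases ((IsP_prime hp).2.2 d c hpg) with hpd | hpc
        · right
          have hple : p ≤ d := Int.le_of_dvd (by omega) hpd
          by_contra hne
          exact hmin p hp.1 (by omega) (by rw [hc]; exact hpg)
        · exact i3 p hp hpc
      · simp only [if_neg hr]
        have hnd : ¬ d ∣ g := fun h => hr ((PySem.Int.mod_eq_zero_iff_dvd g d).mpr h)
        exact ⟨dvd_refl g, hnd, fun p _ hpg => Or.inl hpg⟩

theorem bLoop_spec (fuel : Nat) (d g : Int) (res : List Int) (hd : 2 ≤ d) (hg : 1 ≤ g)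
    (hmin : ∀ k : Int, 2 ≤ k → k < d → ¬ k ∣ g)
    (hres : ∀ a ∈ res, 2 ≤ a ∧ a < d) (hpw : res.Pairwise (· < ·))
    (hfuel : (g + 2 - d).toNat ≤ fuel) :
    (∀ y : Int, y ∈ bLoop fuel d g res ↔ y ∈ res ∨ (IsP y ∧ y ∣ g)) ∧
    (bLoop fuel d g res).Pairwise (· < ·) := by
  induction fuel generalizing d g res with
  | zero =>
      rw [bLoop]
      have hdn : ¬ d * d ≤ g := by
        intro h
        have : g + 2 ≤ d := by omega
        nlinarith
      exact pfExit d g res hd hg hdn hmin hres hpw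
  | succ fuel ih =>
      rw [bLoop]
      by_cases hdn : d * d ≤ g
      · simp only [if_pos hdn]
        by_cases hr : PySem.Int.mod g d = 0
        · simp only [if_pos hr]
          have hdvd : d ∣ g := (PySem.Int.mod_eq_zero_iff_dvd g d).mp hr
          have hfst := bStrip_fst (g.toNat + 1) d g hd hg
          have hfin : g.toNat < 2 ^ (g.toNat + 1) :=
            lt_of_lt_of_le Nat.lt_two_pow_self (Nat.pow_le_pow_right (by omega) (by omega))
          obtain ⟨s1, s2, s3⟩ := bStrip_spec (g.toNat + 1) d g hd hg hmin hfin
          have hdP : IsP d := IsP_of_min_dvd hd hdvd hmin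
          have hmin' : ∀ k : Int, 2 ≤ k → k < d + 1 → ¬ k ∣ bStrip (g.toNat + 1) d g := by
            intro k hk2 hkd hkdvd
            rcases lt_or_eq_of_le (by omega : k ≤ d) with hlt | rfl
            · exact hmin k hk2 hlt (hkdvd.trans s1)
            · exact s2 hkdvd
          have hres' : ∀ a ∈ res ++ [d], 2 ≤ a ∧ a < d + 1 := by
            intro a ha
            rcases List.mem_append.mp ha with h' | h'
            · have := hres a h'; omega
            · simp at h'; omega
          have hpw' : (res ++ [d]).Pairwise (· < ·) := by
            rw [List.pairwise_append]
            exact ⟨hpw, List.pairwise_singleton _ _, by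
              intro a ha b hb; simp at hb; subst hb; exact (hres a ha).2⟩
          have hlen : d ≤ g := by nlinarith
          obtain ⟨IHmem, IHpw⟩ := ih (d + 1) _ _ (by omega) hfst.1 hmin' hres' hpw'
            (by have := hfst.2; omega)
          refine ⟨fun y => ?_, IHpw⟩
          rw [IHmem y]
          simp only [List.mem_append, List.mem_singleton]
          constructor
          · rintro ((hy | rfl) | ⟨hyp, hydvd⟩)
            · exact Or.inl hy
            · exact Or.inr ⟨hdP, hdvd⟩
            · exact Or.inr ⟨hyp, hydvd.trans s1⟩
          · rintro (hy | ⟨hyp, hydvd⟩)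
            · exact Or.inl (Or.inl hy)
            · rcases s3 y hyp hydvd with h | rfl
              · exact Or.inr ⟨hyp, h⟩
              · exact Or.inl (Or.inr rfl)
        · simp only [if_neg hr]
          have hnd : ¬ d ∣ g := fun h => hr ((PySem.Int.mod_eq_zero_iff_dvd g d).mpr h)
          have hmin' : ∀ k : Int, 2 ≤ k → k < d + 1 → ¬ k ∣ g := by
            intro k hk2 hkd
            rcases lt_or_eq_of_le (by omega : k ≤ d) with hlt | rfl
            · exact hmin k hk2 hlt
            · exact hnd
          have hres' : ∀ a ∈ res, 2 ≤ a ∧ a < d + 1 := fun a ha => by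
            have := hres a ha; omega
          exact ih (d + 1) g res (by omega) hg hmin' hres' hpw (by omega)
      · simp only [if_neg hdn]
        exact pfExit d g res hd hg hdn hmin hres hpw

theorem bFactor_mem {g : Int} (hg : 1 ≤ g) (y : Int) :
    y ∈ bFactor g ↔ IsP y ∧ y ∣ g := by
  have h := bLoop_spec (g.toNat + 2) 2 g [] (by omega) hg
    (fun k hk2 hkd _ => by omega) (fun a ha => by simp at ha) List.Pairwise.nil (by omega)
  rw [bFactor, h.1 y]
  simp

theorem bFactor_pairwise {g : Int} (hg : 1 ≤ g) : (bFactor g).Pairwise (· < ·) :=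
  (bLoop_spec (g.toNat + 2) 2 g [] (by omega) hg
    (fun k hk2 hkd _ => by omega) (fun a ha => by simp at ha) List.Pairwise.nil (by omega)).2

theorem bgcd_spec (fuel : Nat) (a b : Int) (ha : 1 ≤ a) (hb : 0 ≤ b)
    (hfuel : b.toNat < fuel) :
    1 ≤ bgcd fuel a b ∧ ∀ y : Int, y ∣ bgcd fuel a b ↔ y ∣ a ∧ y ∣ b := by
  induction fuel generalizing a b with
  | zero => omega
  | succ fuel ih =>
      rw [bgcd]
      by_cases hb0 : b = 0
      · subst hb0
        simp only [ne_eq, not_true_eq_false, if_false]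
        exact ⟨ha, fun y => ⟨fun h => ⟨h, dvd_zero y⟩, fun h => h.1⟩⟩
      · simp only [ne_eq, hb0, not_false_eq_true, if_true]
        have hbpos : 0 < b := by omega
        have hmod : PySem.Int.mod a b = a % b := PySem.Int.mod_eq_emod_of_pos hbpos
        have hr0 : 0 ≤ a % b := Int.emod_nonneg a (by omega)
        have hrb : a % b < b := Int.emod_lt_of_pos a hbpos
        rw [hmod]
        obtain ⟨hpos, hchar⟩ := ih b (a % b) (by omega) hr0 (by omega)
        refine ⟨hpos, fun y => ?_⟩
        rw [hchar y]
        have hdecomp : b * (a / b) + a % b = a := Int.mul_ediv_add_emod a b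
        constructor
        · rintro ⟨hyb, hyr⟩
          exact ⟨by rw [← hdecomp]; exact dvd_add (hyb.mul_right _) hyr, hyb⟩
        · rintro ⟨hya, hyb⟩
          refine ⟨hyb, ?_⟩
          have : a % b = a - b * (a / b) := by omega
          rw [this]
          exact dvd_sub hya (hyb.mul_right _)

theorem gcdFold_spec (l : List Int) (g : Int) (hg : 1 ≤ g) (hl : ∀ x ∈ l, 0 ≤ x) :
    1 ≤ l.foldl (fun g x => bgcd (x.toNat + 1) g x) g ∧
    ∀ y : Int, y ∣ l.foldl (fun g x => bgcd (x.toNat + 1) g x) g ↔ y ∣ g ∧ ∀ x ∈ l, y ∣ x := by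
  induction l generalizing g with
  | nil => exact ⟨hg, fun y => by simp⟩
  | cons x xs ih =>
      simp only [List.foldl_cons]
      have hx0 : 0 ≤ x := hl x (List.mem_cons_self ..)
      obtain ⟨hpos, hchar⟩ := bgcd_spec (x.toNat + 1) g x hg hx0 (by omega)
      obtain ⟨hpos', hchar'⟩ := ih (bgcd (x.toNat + 1) g x) hpos
        (fun z hz => hl z (List.mem_cons_of_mem _ hz))
      refine ⟨hpos', fun y => ?_⟩
      rw [hchar' y, hchar y]
      simp only [List.mem_cons]
      constructor
      · rintro ⟨⟨hyg, hyx⟩, h⟩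
        refine ⟨hyg, ?_⟩
        rintro z (rfl | hz)
        · exact hyx
        · exact h z hz
      · rintro ⟨hyg, h⟩
        exact ⟨⟨hyg, h x (Or.inl rfl)⟩, fun z hz => h z (Or.inr hz)⟩

-- two strictly increasing lists with the same members are equal
theorem eq_of_pairwise_lt_of_mem (l₁ l₂ : List Int)
    (h₁ : l₁.Pairwise (· < ·)) (h₂ : l₂.Pairwise (· < ·))
    (hmem : ∀ y : Int, y ∈ l₁ ↔ y ∈ l₂) : l₁ = l₂ := by
  exact List.Perm.eq_of_pairwise (fun a b _ _ hab hba => absurd hab (lt_asymm hba)) h₁ h₂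
    ((List.perm_ext_iff_of_nodup (h₁.imp ne_of_lt) (h₂.imp ne_of_lt)).mpr hmem)

-- ===== VERDICT (by name: the statement is the Claim_ definition above) =====
theorem common_prime_factors_spec : Claim_equal_common_prime_factors := by
  intro l hdom hpre
  unfold Spec_common_prime_factors
  rcases hmq : PySem.List.min? l (fun x => x) with _ | m
  · exact absurd ((PySem.List.min?_eq_none_iff l _).mp hmq) hpre
  have hm_mem : m ∈ l := PySem.List.min?_mem hmq
  have hm_min : ∀ x ∈ l, m ≤ x := PySem.List.min?_isMin hmq
  rw [common_prime_factors_alt, hmq]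
  by_cases hm1 : m ≤ 1
  · simp only [if_pos hm1]
    rw [common_prime_factors]
    by_cases hlen : l.length = 1
    · obtain ⟨a, rfl⟩ := List.length_eq_one_iff.mp hlen
      have hma : m = a := by simpa using hm_mem
      subst hma
      simp only [if_pos hlen]
      show (match PySem.List.pyGet? [m] 0 with
            | some a => prime_factors a
            | none => []) = []
      simp [PySem.List.pyGet?, PySem.List.pyIdx?, pf_le_one hm1]
    · simp only [if_neg hlen, hmq]
      rw [pf_le_one hm1]
      exact List.sublist_nil.mp (Afold_sublist m l [])
  · have hm2 : 2 ≤ m := by omega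
    simp only [if_neg hm1]
    obtain ⟨hG1, hGchar⟩ := gcdFold_spec l m (by omega)
      (fun x hx => by have := hm_min x hx; omega)
    rw [common_prime_factors]
    by_cases hlen : l.length = 1
    · obtain ⟨a, rfl⟩ := List.length_eq_one_iff.mp hlen
      have hma : m = a := by simpa using hm_mem
      subst hma
      simp only [if_pos hlen]
      show (match PySem.List.pyGet? [m] 0 with
            | some a => prime_factors a
            | none => []) = _
      have hget : PySem.List.pyGet? [m] 0 = some m := by
        simp [PySem.List.pyGet?, PySem.List.pyIdx?]
      rw [hget]
      refine eq_of_pairwise_lt_of_mem _ _ (pf_pairwise m) (bFactor_pairwise hG1) (fun y => ?_)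
      rw [pf_mem (by omega) y, bFactor_mem hG1 y, hGchar y]
      constructor
      · rintro ⟨hyp, hym⟩
        exact ⟨hyp, hym, by rintro z hz; simp at hz; subst hz; exact hym⟩
      · rintro ⟨hyp, hym, _⟩
        exact ⟨hyp, hym⟩
    · simp only [if_neg hlen, hmq]
      have hApw : (l.foldl
          (fun r x => if x ≠ m then r.filter (fun i => decide (PySem.Int.mod x i = 0)) else r)
          (prime_factors m)).Pairwise (· < ·) :=
        List.Pairwise.sublist (Afold_sublist m l _) (pf_pairwise m)
      refine eq_of_pairwise_lt_of_mem _ _ hApw (bFactor_pairwise hG1) (fun y => ?_)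
      rw [Afold_mem, bFactor_mem hG1 y, hGchar y, pf_mem (by omega : (1:Int) ≤ m) y]
      constructor
      · rintro ⟨⟨hyp, hym⟩, h⟩
        refine ⟨hyp, hym, fun x hx => ?_⟩
        by_cases hxm : x = m
        · subst hxm; exact hym
        · exact (PySem.Int.mod_eq_zero_iff_dvd x y).mp (h x hx hxm)
      · rintro ⟨hyp, hym, h⟩
        exact ⟨⟨hyp, hym⟩, fun x hx _ =>
          (PySem.Int.mod_eq_zero_iff_dvd x y).mpr (h x hx)⟩
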